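-- pv_equiv track=rewrite | github.com/AndrewAmburn/IRIS | scripts/ts_prm_maker.py | replace_center_in_content
-- ===== SOURCE A (Python) =====
-- def replace_center_in_content(content, coordinates):
--     """
--     Replace the 'CENTER' line in the content with new coordinates.
--
--     Args:
--         content (str): The file content to update.
--         coordinates (list): List of x, y, z coordinates as strings.
--
--     Returns:
--         str: Updated content with the new CENTER line.
--     """
--     lines = content.split('\n')
--     for i, line in enumerate(lines):
--         if line.strip().startswith('CENTER'):
--             leading_spaces = len(line) - len(line.lstrip())  # Preserve indentation
--             lines[i] = ' ' * leading_spaces + f'CENTER ({coordinates[0]},{coordinates[1]},{coordinates[2]})'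
--             break
--     return '\n'.join(lines)
-- ===== SOURCE B (Python) =====
-- def replace_center_in_content(content, coordinates):
--     """
--     Replace the first 'CENTER' line in the content with new coordinates.
--
--     Consumes the raw string with str.partition('\n') instead of splitting it
--     into a line list: lines already scanned are appended to a prefix buffer,
--     and as soon as the CENTER line is found the untouched remainder (separator
--     plus tail) is reattached verbatim, so no list is rebuilt or re-joined.
--     """
--     prefix = []
--     rest = content
--     while True:
--         head, sep, tail = rest.partition('\n')
--         if head.strip().startswith('CENTER'):
--             pad = ' ' * (len(head) - len(head.lstrip()))
--             new_line = f'{pad}CENTER ({coordinates[0]},{coordinates[1]},{coordinates[2]})'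
--             return ''.join(prefix) + new_line + sep + tail
--         if not sep:
--             return content
--         prefix.append(head + sep)
--         rest = tail
-- ===== Notes on version B (the rewrite author's own statement) =====
-- stated objective: alternative
-- what changed: B never builds a line list: it consumes the raw string with str.partition('\n'), accumulating scanned lines in a prefix buffer and, on the first CENTER line, reattaches the untouched remainder verbatim, so A's split/enumerate/mutate/join pipeline disappears.
import Mathlib
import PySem

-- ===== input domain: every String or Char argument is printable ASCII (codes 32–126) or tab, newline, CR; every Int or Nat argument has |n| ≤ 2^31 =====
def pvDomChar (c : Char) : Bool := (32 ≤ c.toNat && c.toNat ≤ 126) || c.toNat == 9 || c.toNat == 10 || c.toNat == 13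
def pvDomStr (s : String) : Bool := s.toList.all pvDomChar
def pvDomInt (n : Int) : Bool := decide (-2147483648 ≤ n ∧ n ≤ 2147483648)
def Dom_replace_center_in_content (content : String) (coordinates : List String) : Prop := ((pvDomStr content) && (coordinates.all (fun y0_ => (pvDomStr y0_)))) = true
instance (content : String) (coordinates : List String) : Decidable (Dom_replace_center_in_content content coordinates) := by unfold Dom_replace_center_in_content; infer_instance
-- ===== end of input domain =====

-- B consumes the raw string with partition('\n') (prefix accumulator + untouched
-- remainder) instead of A's split-into-lines / indexed-mutate / re-join pipeline.

-- Both Pythons test a line with line.strip().startswith('CENTER') and build the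
-- same f-string replacement line; ported once at char level, shared by both ports.
def pvIsCenterC (line : List Char) : Bool :=
  PySem.Chars.startswith (PySem.Chars.strip line) "CENTER".toList

def pvNewLineC (line : List Char) (coordinates : List String) : List Char :=
  List.replicate (line.length - (PySem.Chars.lstrip line).length) ' '
    ++ "CENTER (".toList ++ (PySem.List.pyGetD coordinates 0 "").toList
    ++ [','] ++ (PySem.List.pyGetD coordinates 1 "").toList
    ++ [','] ++ (PySem.List.pyGetD coordinates 2 "").toList ++ [')']

-- ===== PORT A =====
-- A's loop: walk enumerate(lines); on the first CENTER line set lines[i] and break.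
def pvALoop (coordinates : List String) (lines : List (List Char)) :
    List (Int × List Char) → List (List Char)
  | [] => lines
  | (i, line) :: rest =>
      if pvIsCenterC line then lines.set i.toNat (pvNewLineC line coordinates)
      else pvALoop coordinates lines rest

def replace_center_in_content (content : String) (coordinates : List String) : String :=
  -- content.split('\n'): sep "\n" ≠ "", so split? is some; lines kept as char lists
  let lines := ((PySem.Str.split? content "\n").getD []).map String.toList
  -- '\n'.join(...): PySem.Str.join on the String side is exactly Chars.join here
  String.ofList (PySem.Chars.join ['\n'] (pvALoop coordinates lines (PySem.List.enumerate lines 0)))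

-- ===== PORT B =====
-- B's while-loop: head, sep, tail = rest.partition('\n') (head = takeWhile, sep+tail
-- = dropWhile); on a CENTER head return prefix + new line + sep + tail; if sep is
-- empty return content; else push head+sep onto the prefix and continue with tail.
def pvBLoop (content : List Char) (coordinates : List String)
    (acc rest : List Char) : List Char :=
  let head := rest.takeWhile (· ≠ '\n')
  let rest' := rest.dropWhile (· ≠ '\n')   -- = sep ++ tail ([] or '\n' :: tail)
  if pvIsCenterC head then acc ++ pvNewLineC head coordinates ++ rest'
  else if hEmpty : rest'.isEmpty then content
  else pvBLoop content coordinates (acc ++ head ++ ['\n']) rest'.tail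
termination_by rest.length
decreasing_by
  have h1 : rest'.length ≤ rest.length := (List.dropWhile_sublist _).length_le
  have h2 : rest' ≠ [] := by simpa [List.isEmpty_iff] using hEmpty
  have h4 : rest'.length ≠ 0 := by simpa [List.length_eq_zero_iff] using h2
  show rest'.tail.length < rest.length
  rw [List.length_tail]
  omega

def replace_center_in_content_alt (content : String) (coordinates : List String) : String :=
  String.ofList (pvBLoop content.toList coordinates [] content.toList)

-- ===== PRECONDITION & SPEC =====
-- Pre_ excludes exactly the inputs where Python A raises IndexError: some line
-- matches CENTER but fewer than three coordinates are given.
def Pre_replace_center_in_content (content : String) (coordinates : List String) : Prop :=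
  (((PySem.Str.split? content "\n").getD []).any (fun s => pvIsCenterC s.toList)) = true →
    3 ≤ coordinates.length
instance (content : String) (coordinates : List String) : Decidable (Pre_replace_center_in_content content coordinates) := by unfold Pre_replace_center_in_content; infer_instance

def pvWitness_replace_center_in_content : String × List String :=
  ("TITLE x\n  CENTER (0,0,0)\nEND", ["1.5", "2", "-3"])

def Spec_replace_center_in_content (content : String) (coordinates : List String) (out : String) : Prop := out = replace_center_in_content_alt content coordinates
instance (content : String) (coordinates : List String) (out : String) : Decidable (Spec_replace_center_in_content content coordinates out) := by unfold Spec_replace_center_in_content; infer_instance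

-- ===== CLAIM (what is proved, stated in full; the proofs are below) =====
def Claim_equal_replace_center_in_content : Prop := ∀ (content : String) (coordinates : List String), Dom_replace_center_in_content content coordinates → Pre_replace_center_in_content content coordinates → Spec_replace_center_in_content content coordinates (replace_center_in_content content coordinates)

-- ===== LEMMAS AND PROOFS =====

-- A structural recursion computing content.split('\n') at char level.
def pvSplit1 : List Char → List (List Char)
  | [] => [[]]
  | c :: t =>
      if c = '\n' then [] :: pvSplit1 t
      else
        match pvSplit1 t with
        | [] => [[c]]
        | h :: r => (c :: h) :: r

lemma pvSplit1_nl (t : List Char) : pvSplit1 ('\n' :: t) = [] :: pvSplit1 t := rfl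

lemma pvSplit1_cons (c : Char) (t : List Char) (hc : c ≠ '\n') :
    pvSplit1 (c :: t) =
      (match pvSplit1 t with | [] => [[c]] | h :: r => (c :: h) :: r) := by
  simp only [pvSplit1]
  rw [if_neg hc]

lemma pvSplit1_ne_nil (cs : List Char) : pvSplit1 cs ≠ [] := by
  cases cs with
  | nil => simp [pvSplit1]
  | cons c t =>
    by_cases hc : c = '\n'
    · subst hc; simp [pvSplit1_nl]
    · rw [pvSplit1_cons c t hc]
      cases pvSplit1 t <;> simp

lemma pvGo_eq_split1 (l : List Char) : ∀ (fuel : Nat) (cur : List Char)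
    (acc : List (List Char)), l.length ≤ fuel →
    PySem.Chars.splitOn.go ['\n'] fuel l cur acc =
      acc.reverse ++ (match pvSplit1 l with
        | [] => []
        | h :: r => (cur.reverse ++ h) :: r) := by
  induction l with
  | nil =>
    intro fuel cur acc _
    cases fuel <;> simp [PySem.Chars.splitOn.go, pvSplit1]
  | cons c t ih =>
    intro fuel cur acc hle
    cases fuel with
    | zero => simp at hle
    | succ fuel =>
      by_cases hc : c = '\n'
      · subst hc
        have hp : List.isPrefixOf ['\n'] ('\n' :: t) = true := by simp [List.isPrefixOf]
        rw [PySem.Chars.splitOn.go]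
        simp only [hp, if_true, List.length_nil, List.length_cons, List.drop_zero,
          List.drop_succ_cons]
        rw [ih fuel [] (cur.reverse :: acc) (by simpa using hle)]
        cases ht : pvSplit1 t with
        | nil => exact absurd ht (pvSplit1_ne_nil t)
        | cons h r =>
          rw [show pvSplit1 ('\n' :: t) = [] :: pvSplit1 t from rfl, ht]
          simp only [List.reverse_cons, List.append_assoc, List.singleton_append,
            List.append_nil, List.nil_append, List.reverse_nil]
      · have hp : List.isPrefixOf ['\n'] (c :: t) = false := by
          simp only [List.isPrefixOf, Bool.and_eq_false_iff, beq_eq_false_iff_ne, ne_eq]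
          exact Or.inl fun h => hc h.symm
        rw [PySem.Chars.splitOn.go]
        simp only [hp, Bool.false_eq_true, if_false]
        rw [ih fuel (c :: cur) acc (by simpa using Nat.le_of_succ_le_succ hle)]
        cases ht : pvSplit1 t with
        | nil => exact absurd ht (pvSplit1_ne_nil t)
        | cons h r =>
          simp only [pvSplit1_cons c t hc, ht]
          simp only [List.reverse_cons, List.append_assoc, List.singleton_append]

lemma pvSplitOn_eq_split1 (cs : List Char) :
    PySem.Chars.splitOn cs ['\n'] = pvSplit1 cs := by
  unfold PySem.Chars.splitOn
  rw [pvGo_eq_split1 cs (cs.length + 1) [] [] (by omega)]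
  cases h : pvSplit1 cs with
  | nil => exact absurd h (pvSplit1_ne_nil cs)
  | cons a r => simp

-- the A-port's line list IS pvSplit1 of the content's characters
lemma pvLines_eq (content : String) :
    ((PySem.Str.split? content "\n").getD []).map String.toList =
      pvSplit1 content.toList := by
  have h : PySem.Str.split? content "\n" =
      some ((PySem.Chars.splitOn content.toList ['\n']).map String.ofList) := by
    simp [PySem.Str.split?, PySem.Chars.split?]
  rw [h, Option.getD_some, pvSplitOn_eq_split1]
  simp [List.map_map, Function.comp_def]

-- joining pvSplit1 back restores the characters
lemma pvJoin_split1 (cs : List Char) :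
    PySem.Chars.join ['\n'] (pvSplit1 cs) = cs := by
  induction cs with
  | nil => simp [pvSplit1, PySem.Chars.join_singleton]
  | cons c t ih =>
    by_cases hc : c = '\n'
    · subst hc
      rw [pvSplit1_nl]
      cases ht : pvSplit1 t with
      | nil => exact absurd ht (pvSplit1_ne_nil t)
      | cons h r =>
        rw [PySem.Chars.join_cons_cons, ← ht, ih]; rfl
    · rw [pvSplit1_cons c t hc]
      cases ht : pvSplit1 t with
      | nil => exact absurd ht (pvSplit1_ne_nil t)
      | cons h r =>
        rw [ht] at ih
        cases r with
        | nil =>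
          simp only [PySem.Chars.join_singleton] at ih ⊢
          simp [ih]
        | cons q r' =>
          rw [PySem.Chars.join_cons_cons] at ih ⊢
          simp [ih]

-- pvSplit1's partition-shaped unfolding (B's view of one step)
lemma pvSplit1_eq_partition (cs : List Char) :
    pvSplit1 cs = cs.takeWhile (· ≠ '\n') ::
      (match cs.dropWhile (· ≠ '\n') with
       | [] => []
       | _ :: t => pvSplit1 t) := by
  induction cs with
  | nil => simp [pvSplit1]
  | cons c t ih =>
    by_cases hc : c = '\n'
    · subst hc; simp [← pvSplit1_nl]
    · rw [pvSplit1_cons c t hc]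
      rw [List.takeWhile_cons, List.dropWhile_cons]
      simp only [hc, decide_not, ne_eq, not_false_iff, decide_true, if_true]
      rw [ih]
      simp

-- The common spliced result both ports compute.
def pvSpliceC (coordinates : List String) (lines : List (List Char)) : List (List Char) :=
  match lines.findIdx? pvIsCenterC with
  | none => lines
  | some i => lines.take i ++ [pvNewLineC (lines.getD i []) coordinates] ++ lines.drop (i + 1)

lemma pvSpliceC_cons_pos (coordinates : List String) (h : List Char) (t : List (List Char))
    (hc : pvIsCenterC h = true) :
    pvSpliceC coordinates (h :: t) = pvNewLineC h coordinates :: t := by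
  simp [pvSpliceC, List.findIdx?_cons, hc]

lemma pvSpliceC_cons_neg (coordinates : List String) (h : List Char) (t : List (List Char))
    (hc : pvIsCenterC h = false) :
    pvSpliceC coordinates (h :: t) = h :: pvSpliceC coordinates t := by
  unfold pvSpliceC
  rw [List.findIdx?_cons, hc]
  cases hf : t.findIdx? pvIsCenterC with
  | none => simp
  | some j => simp [List.take_succ_cons, List.drop_succ_cons]

lemma pvSpliceC_ne_nil (coordinates : List String) (h : List Char) (t : List (List Char)) :
    pvSpliceC coordinates (h :: t) ≠ [] := by
  by_cases hc : pvIsCenterC h = true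
  · rw [pvSpliceC_cons_pos coordinates h t hc]; simp
  · rw [pvSpliceC_cons_neg coordinates h t (by simpa using hc)]; simp

-- A's loop over the tail `rest`, enumerated from offset pre.length inside pre ++ rest,
-- produces exactly pre ++ the spliced rest.
lemma pvALoop_eq_splice (coordinates : List String) :
    ∀ (rest pre : List (List Char)),
      pvALoop coordinates (pre ++ rest) (PySem.List.enumerate rest pre.length) =
        pre ++ pvSpliceC coordinates rest := by
  intro rest
  induction rest with
  | nil => intro pre; simp [pvALoop, PySem.List.enumerate_nil, pvSpliceC]
  | cons h t ih =>
    intro pre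
    rw [PySem.List.enumerate_cons]
    by_cases hc : pvIsCenterC h = true
    · rw [pvSpliceC_cons_pos coordinates h t hc]
      simp [pvALoop, hc]
    · have hc' : pvIsCenterC h = false := by simpa using hc
      rw [pvSpliceC_cons_neg coordinates h t hc']
      simp only [pvALoop, hc', Bool.false_eq_true, if_false]
      have heq : (pre : List (List Char)) ++ h :: t = (pre ++ [h]) ++ t := by simp
      have hlen : ((pre.length : Int) + 1) = (((pre ++ [h]).length : Nat) : Int) := by
        simp [List.length_append]
      rw [heq, hlen, ih (pre ++ [h])]
      simp

-- B's loop equals the spliced-and-joined remainder, given the prefix invariant.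
lemma pvBLoop_eq_splice (content : List Char) (coordinates : List String) :
    ∀ (rest acc : List Char), acc ++ rest = content →
      pvBLoop content coordinates acc rest =
        acc ++ PySem.Chars.join ['\n'] (pvSpliceC coordinates (pvSplit1 rest)) := by
  intro rest
  induction hn : rest.length using Nat.strong_induction_on generalizing rest with
  | _ n ih =>
    intro acc hacc
    subst hn
    rw [pvBLoop]
    have hsplit := pvSplit1_eq_partition rest
    have htd : rest.takeWhile (· ≠ '\n') ++ rest.dropWhile (· ≠ '\n') = rest :=
      List.takeWhile_append_dropWhile
    by_cases hc : pvIsCenterC (rest.takeWhile (· ≠ '\n')) = true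
    · simp only [hc, if_true]
      cases hre : rest.dropWhile (· ≠ '\n') with
      | nil =>
        rw [hre] at hsplit
        have hsplit2 : pvSplit1 rest = [rest.takeWhile (· ≠ '\n')] := hsplit
        rw [hsplit2, pvSpliceC_cons_pos coordinates _ _ hc,
          PySem.Chars.join_singleton]
        simp
      | cons c t =>
        have hc0 : c = '\n' := by
          have h0 := List.head?_dropWhile_not (p := (· ≠ '\n')) rest
          rw [hre] at h0
          simpa using h0
        subst hc0
        rw [hre] at hsplit
        have hsplit2 : pvSplit1 rest = rest.takeWhile (· ≠ '\n') :: pvSplit1 t := hsplit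
        rw [hsplit2, pvSpliceC_cons_pos coordinates _ _ hc]
        cases ht : pvSplit1 t with
        | nil => exact absurd ht (pvSplit1_ne_nil t)
        | cons q r =>
          rw [PySem.Chars.join_cons_cons, ← ht, pvJoin_split1]
          simp
    · simp only [hc, Bool.false_eq_true, if_false]
      have hc' : pvIsCenterC (rest.takeWhile (· ≠ '\n')) = false := by simpa using hc
      cases hre : rest.dropWhile (· ≠ '\n') with
      | nil =>
        rw [hre] at hsplit
        have hsplit2 : pvSplit1 rest = [rest.takeWhile (· ≠ '\n')] := hsplit
        rw [dif_pos (by simp)]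
        rw [hsplit2, pvSpliceC_cons_neg coordinates _ _ hc']
        simp only [pvSpliceC, List.findIdx?_nil]
        rw [PySem.Chars.join_singleton]
        have hrr : rest.takeWhile (· ≠ '\n') = rest := by
          conv_rhs => rw [← htd]
          rw [hre, List.append_nil]
        rw [hrr]
        exact hacc.symm
      | cons c t =>
        have hc0 : c = '\n' := by
          have h0 := List.head?_dropWhile_not (p := (· ≠ '\n')) rest
          rw [hre] at h0
          simpa using h0
        subst hc0
        rw [dif_neg (by simp)]
        have hlt : t.length < rest.length := by
          have h1 : (rest.dropWhile (· ≠ '\n')).length ≤ rest.length :=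
            (List.dropWhile_sublist _).length_le
          rw [hre] at h1; simp at h1; omega
        have hinv : (acc ++ rest.takeWhile (· ≠ '\n') ++ ['\n']) ++ t = content := by
          calc (acc ++ rest.takeWhile (· ≠ '\n') ++ ['\n']) ++ t
              = acc ++ (rest.takeWhile (· ≠ '\n') ++ '\n' :: t) := by simp
            _ = acc ++ rest := by rw [← hre, htd]
            _ = content := hacc
        simp only [List.tail_cons]
        rw [ih t.length hlt t rfl (acc ++ rest.takeWhile (· ≠ '\n') ++ ['\n']) hinv]
        rw [hre] at hsplit
        have hsplit2 : pvSplit1 rest = rest.takeWhile (· ≠ '\n') :: pvSplit1 t := hsplit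
        rw [hsplit2, pvSpliceC_cons_neg coordinates _ _ hc']
        cases ht : pvSplit1 t with
        | nil => exact absurd ht (pvSplit1_ne_nil t)
        | cons q r =>
          cases hs : pvSpliceC coordinates (q :: r) with
          | nil => exact absurd hs (pvSpliceC_ne_nil coordinates q r)
          | cons u v =>
            rw [PySem.Chars.join_cons_cons]
            simp

-- ===== VERDICT (by name: the statement is the Claim_ definition above) =====
theorem replace_center_in_content_spec : Claim_equal_replace_center_in_content := by
  intro content coordinates _ _
  show replace_center_in_content content coordinates = _
  unfold replace_center_in_content replace_center_in_content_alt
  rw [pvBLoop_eq_splice content.toList coordinates content.toList [] (by simp)]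
  have hA := pvALoop_eq_splice coordinates
    (((PySem.Str.split? content "\n").getD []).map String.toList) []
  simp only [List.nil_append, List.length_nil, Nat.cast_zero] at hA
  show String.ofList (PySem.Chars.join ['\n'] (pvALoop coordinates
      (((PySem.Str.split? content "\n").getD []).map String.toList)
      (PySem.List.enumerate (((PySem.Str.split? content "\n").getD []).map String.toList) 0))) = _
  rw [hA, pvLines_eq content]
  simp
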